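-- pv_equiv track=rewrite | github.com/bujiie/adventofcode2020 | day10/pt2.py | sumOfPrevK
-- ===== SOURCE A (Python) =====
-- def sumOfPrevK(N, K):
--     arr = [0 for i in range(N)]
--     arr[0] = 1
--
--     # Pick a starting point
--     for i in range(1,N):
--         j = i - 1
--         count = 0
--         sum = 0
--
--         # Find the sum of all
--         # elements till count < K
--         while (j >= 0 and count < K):
--             sum = sum + arr[j]
--             j = j - 1
--             count = count + 1
--
--         # Find the value of
--         # sum at i position
--         arr[i] = sum
--
--     return arr[N-1]
-- ===== SOURCE B (Python) =====
-- def sumOfPrevK(N, K):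
--     # O(N) sliding-window: new term = window sum; update window by adding
--     # the new term and subtracting the term that leaves the window.
--     if K <= 0:
--         return 1 if N == 1 else 0
--     vals = [1]
--     window = 1
--     for i in range(1, N):
--         v = window
--         vals.append(v)
--         window += v
--         if i >= K:
--             window -= vals[i - K]
--     return vals[-1]
-- ===== Notes on version B (the rewrite author's own statement) =====
-- stated objective: faster
-- what changed: Replaced the per-index inner backward scan of up to K previous terms with a single pass maintaining a running window sum (add the new term, subtract the term leaving the window).
import Mathlib
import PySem

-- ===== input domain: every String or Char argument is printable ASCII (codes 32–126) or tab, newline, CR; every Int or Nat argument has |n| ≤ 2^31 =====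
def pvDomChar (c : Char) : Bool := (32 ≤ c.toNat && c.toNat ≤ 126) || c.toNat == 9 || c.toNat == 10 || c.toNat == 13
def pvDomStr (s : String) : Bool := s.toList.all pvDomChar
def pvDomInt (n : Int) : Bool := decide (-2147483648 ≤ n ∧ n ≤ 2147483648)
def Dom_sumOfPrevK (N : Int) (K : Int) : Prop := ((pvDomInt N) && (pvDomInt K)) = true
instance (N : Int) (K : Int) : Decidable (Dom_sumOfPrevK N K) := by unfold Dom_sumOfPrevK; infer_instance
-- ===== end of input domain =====

-- B replaces A's per-index backward scan of up to K previous terms with a single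
-- pass keeping a running window sum (add the new term, subtract the one leaving).

-- ===== PORT A =====
-- the inner 'while (j >= 0 and count < K)' loop; arr[j] read with j ≥ 0 in range
-- (the Python list arr is held as an Array Int so that each index update is O(1), as in Python)
def innerSumA (arr : Array Int) (K : Int) (j : Int) (count : Int) (sum : Int) : Int :=
  if _h : 0 ≤ j ∧ count < K then
    innerSumA arr K (j - 1) (count + 1) (sum + arr.getD j.toNat 0)
  else sum
termination_by (j + 1).toNat
decreasing_by omega

def sumOfPrevK (N : Int) (K : Int) : Int :=
  -- arr = [0]*N; arr[0] = 1  (Python raises IndexError when N ≤ 0: outside Pre_)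
  let arr := (Array.replicate N.toNat 0).setIfInBounds 0 1
  -- for i in range(1, N): arr[i] = <inner while-loop sum>
  let arr := (PySem.List.pyRange 1 N 1).foldl
      (fun arr i => arr.setIfInBounds i.toNat (innerSumA arr K (i - 1) 0 0)) arr
  -- return arr[N-1]  (in range for every N ≥ 1)
  (PySem.List.pyGet? arr.toList (N - 1)).getD 0

-- ===== PORT B =====
-- (the Python list vals is held as an Array Int so that append is O(1), as in Python)
def sumOfPrevK_alt (N : Int) (K : Int) : Int :=
  if K ≤ 0 then (if N = 1 then 1 else 0)
  else
    let st := (PySem.List.pyRange 1 N 1).foldl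
        (fun (st : Array Int × Int) i =>
          let v := st.2
          let vals := st.1.push v
          let window := st.2 + v
          let window := if K ≤ i then window - vals.getD (i - K).toNat 0 else window
          (vals, window)) (#[1], 1)
    -- return vals[-1]  (vals is never empty)
    (PySem.List.pyGet? st.1.toList (-1)).getD 0

-- ===== PRECONDITION & SPEC =====
-- Pre_ excludes exactly N ≤ 0, where the Python A raises IndexError at 'arr[0] = 1'.
def Pre_sumOfPrevK (N : Int) (K : Int) : Prop := 1 ≤ N
instance (N : Int) (K : Int) : Decidable (Pre_sumOfPrevK N K) := by unfold Pre_sumOfPrevK; infer_instance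
def pvWitness_sumOfPrevK : Int × Int := (6, 3)

def Spec_sumOfPrevK (N : Int) (K : Int) (out : Int) : Prop := out = sumOfPrevK_alt N K
instance (N : Int) (K : Int) (out : Int) : Decidable (Spec_sumOfPrevK N K out) := by unfold Spec_sumOfPrevK; infer_instance

-- ===== CLAIM (what is proved, stated in full; the proofs are below) =====
def Claim_equal_sumOfPrevK : Prop := ∀ (N : Int) (K : Int), Dom_sumOfPrevK N K → Pre_sumOfPrevK N K → Spec_sumOfPrevK N K (sumOfPrevK N K)

-- ===== LEMMAS AND PROOFS =====

-- List-level shadow of innerSumA (the proofs below work on List states)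
def innerSumL (arr : List Int) (K : Int) (j : Int) (count : Int) (sum : Int) : Int :=
  if _h : 0 ≤ j ∧ count < K then
    innerSumL arr K (j - 1) (count + 1) (sum + arr.getD j.toNat 0)
  else sum
termination_by (j + 1).toNat
decreasing_by omega

theorem arrayGetD_toList (a : Array Int) (i : Nat) (d : Int) : a.getD i d = a.toList.getD i d := by
  simp [Array.getD, List.getD]
  split <;> rename_i h
  · simp [Array.getElem?_eq_getElem h]
  · simp [Array.getElem?_eq_none (Nat.le_of_not_lt h)]

theorem innerSumA_toList (arr : Array Int) (K : Int) (j count sum : Int) :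
    innerSumA arr K j count sum = innerSumL arr.toList K j count sum := by
  rw [innerSumA, innerSumL]
  split_ifs with h
  · rw [innerSumA_toList arr K (j - 1) (count + 1) _, arrayGetD_toList]
  · rfl
termination_by (j + 1).toNat
decreasing_by omega

-- closed form of A's inner while loop: it sums the segment of arr between
-- max(0, j+1-(K-count)) and j (inclusive), read back-to-front.
theorem innerSumL_eq (arr : List Int) (K : Int) (j count sum : Int)
    (hj : -1 ≤ j) (hlen : (j + 1).toNat ≤ arr.length) :
    innerSumL arr K j count sum
      = sum + (((arr.take (j + 1).toNat).drop (j + 1 - (K - count)).toNat)).sum := by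
  rw [innerSumL]
  split_ifs with h
  · obtain ⟨hj0, hc⟩ := h
    rw [innerSumL_eq arr K (j - 1) (count + 1) _ (by omega) (by omega)]
    have hjn : j.toNat < arr.length := by omega
    have ht : arr.take (j + 1).toNat = arr.take j.toNat ++ [arr[j.toNat]] := by
      have : (j + 1).toNat = j.toNat + 1 := by omega
      rw [this, List.take_succ_eq_append_getElem hjn]
    have hd : (j - 1 + 1 - (K - (count + 1))).toNat = (j + 1 - (K - count)).toNat := by omega
    have hle : (j + 1 - (K - count)).toNat ≤ (arr.take j.toNat).length := by
      simp [List.length_take]; omega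
    have hd0 : (j - 1 + 1).toNat = j.toNat := by omega
    have hg : arr.getD j.toNat 0 = arr[j.toNat] := List.getD_eq_getElem arr 0 hjn
    rw [hd0, hd, ht, List.drop_append_of_le_length hle, List.sum_append, hg]
    simp only [List.sum_cons, List.sum_nil]
    ring
  · -- loop does not run: either j = -1 (empty take) or count ≥ K (drop everything)
    rcases (not_and_or.mp h) with h1 | h2
    · have : (j + 1).toNat = 0 := by omega
      simp [this]
    · have hK : K - count ≤ 0 := by omega
      have : (arr.take (j + 1).toNat).length ≤ (j + 1 - (K - count)).toNat := by
        simp [List.length_take]; omega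
      rw [List.drop_eq_nil_of_le this]
      simp
termination_by (j + 1).toNat
decreasing_by omega

-- List-level shadows of the two loop bodies (for the inductions below)
def stepA (K : Int) (arr : List Int) (i : Int) : List Int :=
  arr.set i.toNat (innerSumL arr K (i - 1) 0 0)

def stepB (K : Int) (st : List Int × Int) (i : Int) : List Int × Int :=
  let v := st.2
  let vals := st.1 ++ [v]
  let window := st.2 + v
  let window := if K ≤ i then window - vals.getD (i - K).toNat 0 else window
  (vals, window)

-- the Array-state folds of the two ports project (via toList) onto the List-level folds
theorem foldlA_toList (K : Int) (l : List Int) (a : Array Int) :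
    (l.foldl (fun arr i => arr.setIfInBounds i.toNat (innerSumA arr K (i - 1) 0 0)) a).toList
      = l.foldl (stepA K) a.toList := by
  induction l generalizing a with
  | nil => rfl
  | cons x t ih =>
    simp only [List.foldl_cons]
    rw [ih]
    congr 1
    rw [Array.toList_setIfInBounds, innerSumA_toList]
    rfl

theorem foldlB_toList (K : Int) (l : List Int) (st : Array Int × Int) :
    ((l.foldl
        (fun (st : Array Int × Int) i =>
          let v := st.2
          let vals := st.1.push v
          let window := st.2 + v
          let window := if K ≤ i then window - vals.getD (i - K).toNat 0 else window
          (vals, window)) st).1.toList,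
      (l.foldl
        (fun (st : Array Int × Int) i =>
          let v := st.2
          let vals := st.1.push v
          let window := st.2 + v
          let window := if K ≤ i then window - vals.getD (i - K).toNat 0 else window
          (vals, window)) st).2)
      = l.foldl (stepB K) (st.1.toList, st.2) := by
  induction l generalizing st with
  | nil => rfl
  | cons x t ih =>
    simp only [List.foldl_cons]
    rw [ih]
    congr 1
    simp [stepB, ← Array.toList_push, Array.getElem?_toList]

-- K ≤ 0: every outer step of A writes a 0 over a 0, so the array never changes
theorem foldlA_K_nonpos (K : Int) (hK : K ≤ 0) (sz : Nat) (m : Int) :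
    (PySem.List.pyRange 1 m 1).foldl (stepA K) ((List.replicate sz 0).set 0 1)
      = (List.replicate sz 0).set 0 1 := by
  have key : ∀ (l : List Int), (∀ i ∈ l, 1 ≤ i) →
      l.foldl (stepA K) ((List.replicate sz 0).set 0 1) = (List.replicate sz 0).set 0 1 := by
    intro l
    induction l with
    | nil => intro _; rfl
    | cons a t ih =>
      intro hmem
      have ha : 1 ≤ a := hmem a (List.mem_cons_self)
      have hstep : stepA K ((List.replicate sz 0).set 0 1) a = (List.replicate sz 0).set 0 1 := by
        unfold stepA
        rw [innerSumL]
        split_ifs with h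
        · omega
        · cases sz with
          | zero => simp
          | succ n =>
            have hrep : (List.replicate (n + 1) (0 : Int)).set 0 1 = 1 :: List.replicate n 0 := by
              simp [List.replicate_succ]
            rw [hrep]
            have hat : a.toNat = (a.toNat - 1) + 1 := by omega
            rw [hat, List.set_cons_succ, List.set_replicate_self]
      rw [List.foldl_cons, hstep]
      exact ih (fun i hi => hmem i (List.mem_cons_of_mem a hi))
  exact key _ (fun i hi => ((PySem.List.mem_pyRange_one).mp hi).1)

-- the coupled invariant for K ≥ 1: after processing range(1, m+1) A's array is
-- B's vals padded with zeros, and B's window is the sum of the last ≤K entries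
theorem invariant (K : Int) (hK : 1 ≤ K) (sz : Nat) :
    ∀ (m : Nat), m + 1 ≤ sz →
    ∃ vals window,
      (PySem.List.pyRange 1 ((m : Int) + 1) 1).foldl (stepB K) ([1], 1) = (vals, window) ∧
      vals.length = m + 1 ∧
      (PySem.List.pyRange 1 ((m : Int) + 1) 1).foldl (stepA K) ((List.replicate sz 0).set 0 1)
        = vals ++ List.replicate (sz - (m + 1)) 0 ∧
      window = (vals.drop ((m : Int) + 1 - K).toNat).sum := by
  intro m
  induction m with
  | zero =>
    intro hsz
    refine ⟨[1], 1, ?_, rfl, ?_, ?_⟩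
    · simp [PySem.List.pyRange_one_eq_nil]
    · rw [PySem.List.pyRange_one_eq_nil (by omega)]
      cases sz with
      | zero => omega
      | succ n => simp [List.replicate_succ]
    · have h0 : ((1 : Int) - K).toNat = 0 := by omega
      simp [h0]
  | succ m ih =>
    intro hsz
    obtain ⟨vals, window, hB, hlen, hA, hw⟩ := ih (by omega)
    have hrng : PySem.List.pyRange 1 ((m : Int) + 1 + 1) 1
        = PySem.List.pyRange 1 ((m : Int) + 1) 1 ++ [(m : Int) + 1] := by
      exact PySem.List.pyRange_one_succ_right (by omega)
    set i : Int := (m : Int) + 1 with hi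
    -- the array at the start of step i
    set arr : List Int := vals ++ List.replicate (sz - (m + 1)) 0 with harr
    have harrlen : arr.length = sz := by simp [harr, hlen]; omega
    -- A's new value written at index i equals B's window
    have hval : innerSumL arr K (i - 1) 0 0 = window := by
      rw [innerSumL_eq arr K (i - 1) 0 0 (by omega) (by rw [harrlen]; omega)]
      have h1 : (i - 1 + 1).toNat = m + 1 := by omega
      have h2 : arr.take (m + 1) = vals := by
        rw [harr, List.take_append_of_le_length (by omega), List.take_of_length_le (by omega)]
      have h3 : (i - 1 + 1 - (K - 0)).toNat = (i - K).toNat := by omega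
      rw [h1, h2, h3, hw, hi]
      simp
    -- A's step
    have hAstep : stepA K arr i = (vals ++ [window]) ++ List.replicate (sz - (m + 2)) 0 := by
      unfold stepA
      rw [hval]
      have hit : i.toNat = vals.length := by omega
      rw [harr, hit, List.set_append_right _ _ (le_refl _), Nat.sub_self]
      have hr : sz - (m + 1) = (sz - (m + 2)) + 1 := by omega
      rw [hr, List.replicate_succ, List.set_cons_zero]
      simp
    -- B's step
    set vals' : List Int := vals ++ [window] with hvals'
    have hvlen' : vals'.length = m + 2 := by simp [hvals', hlen]
    have hBstep : stepB K (vals, window) i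
        = (vals', if K ≤ i then window + window - vals'.getD (i - K).toNat 0 else window + window) := by
      unfold stepB
      split_ifs with h <;> simp [hvals']
    -- the new window closed form
    have hwin' : (if K ≤ i then window + window - vals'.getD (i - K).toNat 0 else window + window)
        = (vals'.drop (i + 1 - K).toNat).sum := by
      split_ifs with h
      · -- i ≥ K: the element at index (i-K) leaves the window
        set d : Nat := (i - K).toNat with hd
        have hdm : d < vals.length := by omega
        have hdrop : vals.drop d = vals[d] :: vals.drop (d + 1) :=
          List.drop_eq_getElem_cons hdm
        have hget : vals'.getD d 0 = vals[d] := by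
          rw [hvals', List.getD_append _ _ _ _ hdm]
          exact List.getD_eq_getElem vals 0 hdm
        have hd1 : (i + 1 - K).toNat = d + 1 := by omega
        have hdrop' : vals'.drop (d + 1) = vals.drop (d + 1) ++ [window] := by
          rw [hvals', List.drop_append_of_le_length (by omega)]
        have hdropc : vals.drop d = vals[d] :: vals.drop (d + 1) := List.drop_eq_getElem_cons hdm
        have hsum : window = vals[d] + (vals.drop (d + 1)).sum := by
          rw [hw, hdropc, List.sum_cons]
        rw [hget, hd1, hdrop', List.sum_append]
        simp only [List.sum_cons, List.sum_nil]
        linarith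
      · -- i < K: nothing leaves the window yet
        have h0 : (i + 1 - K).toNat = 0 := by omega
        have h0' : (i - K).toNat = 0 := by omega
        rw [h0, List.drop_zero, hvals', List.sum_append, hw, h0', List.drop_zero]
        simp
    refine ⟨vals', (vals'.drop (i + 1 - K).toNat).sum, ?_, hvlen', ?_, rfl⟩
    · have hc : ((m + 1 : Nat) : Int) + 1 = i + 1 := by simp [hi]
      rw [hc, hrng, List.foldl_append, hB]
      simp only [List.foldl_cons, List.foldl_nil]
      rw [hBstep, hwin']
    · have hc : ((m + 1 : Nat) : Int) + 1 = i + 1 := by simp [hi]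
      rw [hc, hrng, List.foldl_append, hA]
      simp only [List.foldl_cons, List.foldl_nil]
      rw [hAstep]

-- ===== VERDICT (by name: the statement is the Claim_ definition above) =====
theorem sumOfPrevK_spec : Claim_equal_sumOfPrevK := by
  intro N K _ hPre
  simp only [Spec_sumOfPrevK, sumOfPrevK, sumOfPrevK_alt]
  have hN : 1 ≤ N := hPre
  have hAL : ((PySem.List.pyRange 1 N 1).foldl
        (fun arr i => arr.setIfInBounds i.toNat (innerSumA arr K (i - 1) 0 0))
        ((Array.replicate N.toNat 0).setIfInBounds 0 1)).toList
      = (PySem.List.pyRange 1 N 1).foldl (stepA K) ((List.replicate N.toNat 0).set 0 1) := by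
    rw [foldlA_toList]
    congr 1
    rw [Array.toList_setIfInBounds, Array.toList_replicate]
  rw [hAL]
  by_cases hK : K ≤ 0
  · -- K ≤ 0: A's array stays [1, 0, …, 0]
    rw [if_pos hK, foldlA_K_nonpos K hK N.toNat N]
    have hsz : N.toNat = (N.toNat - 1) + 1 := by omega
    rw [hsz]
    simp only [List.replicate_succ, List.set_cons_zero]
    by_cases h1 : N = 1
    · subst h1
      decide
    · rw [if_neg h1]
      have hge : (2 : Int) ≤ N := by omega
      have := PySem.List.pyGet?_eq_some_getElem (xs := (1 : Int) :: List.replicate (N.toNat - 1) 0)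
        (i := N - 1) (by omega) (by simp; omega)
      rw [this]
      have ht : (N - 1).toNat = (N.toNat - 2) + 1 := by omega
      simp [ht]
  · -- K ≥ 1: the coupled invariant at m + 1 = N.toNat
    rw [if_neg hK]
    obtain ⟨vals, window, hB, hlen, hA, -⟩ :=
      invariant K (by omega) N.toNat (N.toNat - 1) (by omega)
    have hNm : ((N.toNat - 1 : Nat) : Int) + 1 = N := by omega
    rw [hNm] at hB hA
    have hBL := foldlB_toList K (PySem.List.pyRange 1 N 1) (#[1], 1)
    simp only [] at hBL
    rw [hB] at hBL
    have hstl : ((PySem.List.pyRange 1 N 1).foldl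
        (fun (st : Array Int × Int) i =>
          let v := st.2
          let vals := st.1.push v
          let window := st.2 + v
          let window := if K ≤ i then window - vals.getD (i - K).toNat 0 else window
          (vals, window)) (#[1], 1)).1.toList = vals := by
      have := congrArg Prod.fst hBL
      simpa using this
    rw [hstl, hA]
    have hrep : N.toNat - (N.toNat - 1 + 1) = 0 := by omega
    rw [hrep, List.replicate_zero, List.append_nil]
    rw [PySem.List.pyGet?_neg_one, PySem.List.pyGet?_of_nonneg (xs := vals) (i := N - 1) (by omega),
      List.getLast?_eq_getElem?]
    have hidx : (N - 1).toNat = vals.length - 1 := by omega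
    rw [hidx]
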